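-- pv_equiv track=rewrite | github.com/gxnda/Calendar-Bot | Go4Schools_Calendar_Fetcher.py | FormatDayIntoPeriods
-- ===== SOURCE A (Python) =====
-- def FormatDayIntoPeriods(Day):
--     # takes in each individual day as a 1d list
--     data = Day
--     Lessons = []
--     tmp = []
--
--     for Object in data:  # Goes Though Data
--         if (Object.startswith("0") or Object.startswith("1")) and (not ":" in Object and not "/" in Object):
--             # If It Starts With a 1 or a 0 & Does Not Contain ':' OR '/'
--
--             tmp.append(Object)  # Add Last Section
--             Lessons.append(tmp)  # Add It To The Lessons
--             tmp = []  # Clear Tmp Var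
--         else:
--             tmp.append(Object)
--
--     return Lessons
-- ===== SOURCE B (Python) =====
-- def FormatDayIntoPeriods(Day):
--     # Boundary-index decomposition: find all delimiter positions first,
--     # then emit one slice per boundary (trailing tail after the last
--     # boundary is naturally dropped).
--     def is_end(s):
--         return (s.startswith("0") or s.startswith("1")) and (":" not in s and "/" not in s)
--
--     bounds = [i for i, s in enumerate(Day) if is_end(s)]
--     Lessons = []
--     prev = 0
--     for b in bounds:
--         Lessons.append(Day[prev:b + 1])
--         prev = b + 1
--     return Lessons
-- ===== Notes on version B (the rewrite author's own statement) =====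
-- stated objective: alternative
-- what changed: B first collects the indices of all delimiter entries, then emits one slice Day[prev:b+1] per boundary, instead of A's single pass with a running tmp accumulator.
import Mathlib
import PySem

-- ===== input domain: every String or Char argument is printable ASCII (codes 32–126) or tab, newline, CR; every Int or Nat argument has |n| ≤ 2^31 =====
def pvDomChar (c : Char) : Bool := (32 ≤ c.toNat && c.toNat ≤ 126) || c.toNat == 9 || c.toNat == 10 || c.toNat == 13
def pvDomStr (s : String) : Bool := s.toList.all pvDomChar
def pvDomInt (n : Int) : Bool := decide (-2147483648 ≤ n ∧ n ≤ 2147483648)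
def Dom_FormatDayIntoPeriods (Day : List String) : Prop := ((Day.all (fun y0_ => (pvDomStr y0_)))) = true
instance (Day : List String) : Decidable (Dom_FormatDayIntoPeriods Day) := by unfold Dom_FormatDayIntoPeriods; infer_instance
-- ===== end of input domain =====

-- B replaces A's running-tmp single pass by a boundary-index pass plus per-boundary slices (alternative decomposition, same cost).

-- ===== PORT A =====
-- single pass: tmp accumulates entries, flushed into Lessons at each delimiter
def FormatDayIntoPeriods (Day : List String) : List (List String) :=
  let data := Day
  (data.foldl
    (fun (st : List (List String) × List String) Object =>
      if ((PySem.Str.startswith Object "0" || PySem.Str.startswith Object "1")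
            && (!(PySem.Str.isIn ":" Object) && !(PySem.Str.isIn "/" Object))) then
        (st.1 ++ [st.2 ++ [Object]], ([] : List String))
      else
        (st.1, st.2 ++ [Object]))
    ([], [])).1

-- ===== PORT B =====
-- Source B's is_end helper
def pvIsEnd (s : String) : Bool :=
  (PySem.Str.startswith s "0" || PySem.Str.startswith s "1")
    && (!(PySem.Str.isIn ":" s) && !(PySem.Str.isIn "/" s))

-- boundary indices first, then one slice Day[prev:b+1] per boundary
def FormatDayIntoPeriods_alt (Day : List String) : List (List String) :=
  let bounds := (PySem.List.enumerate Day 0).filterMap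
    (fun p => if pvIsEnd p.2 then some p.1 else none)
  (bounds.foldl
    (fun (st : List (List String) × Int) b =>
      (st.1 ++ [PySem.List.slice Day (some st.2) (some (b + 1))], b + 1))
    ([], 0)).1

-- ===== PRECONDITION & SPEC =====
def Spec_FormatDayIntoPeriods (Day : List String) (out : List (List String)) : Prop := out = FormatDayIntoPeriods_alt Day
instance (Day : List String) (out : List (List String)) : Decidable (Spec_FormatDayIntoPeriods Day out) := by unfold Spec_FormatDayIntoPeriods; infer_instance

-- ===== CLAIM (what is proved, stated in full; the proofs are below) =====
def Claim_equal_FormatDayIntoPeriods : Prop := ∀ (Day : List String), Dom_FormatDayIntoPeriods Day → Spec_FormatDayIntoPeriods Day (FormatDayIntoPeriods Day)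

-- ===== LEMMAS AND PROOFS =====

-- reference grouping both ports are reduced to
def pvRef (tmp : List String) : List String → List (List String)
  | [] => []
  | x :: xs => if pvIsEnd x then (tmp ++ [x]) :: pvRef [] xs else pvRef (tmp ++ [x]) xs

lemma pvA_loop (xs : List String) : ∀ (L : List (List String)) (tmp : List String),
    (xs.foldl
      (fun (st : List (List String) × List String) Object =>
        if ((PySem.Str.startswith Object "0" || PySem.Str.startswith Object "1")
              && (!(PySem.Str.isIn ":" Object) && !(PySem.Str.isIn "/" Object))) then
          (st.1 ++ [st.2 ++ [Object]], ([] : List String))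
        else
          (st.1, st.2 ++ [Object]))
      (L, tmp)).1 = L ++ pvRef tmp xs := by
  induction xs with
  | nil => intro L tmp; simp [pvRef]
  | cons x xs ih =>
    intro L tmp
    simp only [List.foldl_cons]
    rw [show ((PySem.Str.startswith x "0" || PySem.Str.startswith x "1")
          && (!(PySem.Str.isIn ":" x) && !(PySem.Str.isIn "/" x))) = pvIsEnd x from rfl]
    by_cases h : pvIsEnd x
    · simp only [h, if_true, pvRef]
      rw [ih]; simp
    · simp only [h, Bool.false_eq_true, if_false, pvRef]
      exact ih L (tmp ++ [x])

lemma pvB_loop (Day : List String) (xs : List String) :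
    ∀ (front : List String) (acc : List (List String)) (prev : ℕ),
    Day = front ++ xs → prev ≤ front.length →
    (((PySem.List.enumerate xs ((front.length : Int))).filterMap
        (fun p => if pvIsEnd p.2 then some p.1 else none)).foldl
      (fun (st : List (List String) × Int) b =>
        (st.1 ++ [PySem.List.slice Day (some st.2) (some (b + 1))], b + 1))
      (acc, (prev : Int))).1 = acc ++ pvRef (front.drop prev) xs := by
  induction xs with
  | nil => intro front acc prev _ _; simp [PySem.List.enumerate, pvRef]
  | cons x xs ih =>
    intro front acc prev hDay hprev
    rw [PySem.List.enumerate_cons]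
    by_cases h : pvIsEnd x
    · simp only [List.filterMap_cons, h, if_true, List.foldl_cons]
      have hslice : PySem.List.slice Day (some (prev : Int)) (some ((front.length : Int) + 1))
          = front.drop prev ++ [x] := by
        have h1 : ((front.length : Int) + 1) = ((front.length + 1 : ℕ) : Int) := by push_cast; ring
        rw [h1, PySem.List.slice_natCast, hDay,
            List.drop_append_of_le_length hprev]
        have h2 : front.length + 1 - prev = (front.drop prev).length + 1 := by
          simp [List.length_drop]; omega
        rw [h2, List.take_append]
        simp
      rw [hslice]
      have h3 : ((front.length : Int) + 1) = (((front ++ [x]).length : ℕ) : Int) := by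
        simp
      rw [h3]
      have := ih (front ++ [x]) (acc ++ [front.drop prev ++ [x]]) (front ++ [x]).length
        (by simpa using hDay) (le_refl _)
      rw [this]
      simp [pvRef, h]
    · simp only [List.filterMap_cons, h, if_false, Bool.false_eq_true]
      have h3 : ((front.length : Int) + 1) = (((front ++ [x]).length : ℕ) : Int) := by
        simp
      rw [h3]
      have := ih (front ++ [x]) acc prev (by simpa using hDay)
        (by simp; omega)
      rw [this]
      rw [List.drop_append_of_le_length hprev]
      simp [pvRef, h]

-- ===== VERDICT (by name: the statement is the Claim_ definition above) =====
theorem FormatDayIntoPeriods_spec : Claim_equal_FormatDayIntoPeriods := by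
  intro Day _
  unfold Spec_FormatDayIntoPeriods FormatDayIntoPeriods FormatDayIntoPeriods_alt
  rw [pvA_loop]
  have := pvB_loop Day Day [] [] 0 (by simp) (by simp)
  simp only [List.length_nil, Nat.cast_zero] at this
  rw [this]
  simp
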